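-- pv_equiv track=rewrite | github.com/RuizhiPeng/ColabFold | batch/migrate_done_to_cache.py | merge_caches
-- ===== SOURCE A (Python) =====
-- def merge_caches(existing_cache, new_entries):
--     """
--     Merge new entries into existing cache
--     Returns the merged cache and statistics
--     """
--     merged = existing_cache.copy()
--
--     added = 0
--     already_exists = 0
--
--     for jobname, status in new_entries.items():
--         if jobname in merged:
--             already_exists += 1
--         else:
--             merged[jobname] = status
--             added += 1
--
--     return merged, added, already_exists
-- ===== SOURCE B (Python) =====
-- def merge_caches(existing_cache, new_entries):
--     """
--     Merge new entries into existing cache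
--     Returns the merged cache and statistics
--     """
--     fresh = dict(new_entries)
--     for jobname in existing_cache:
--         fresh.pop(jobname, None)
--     merged = {**existing_cache, **fresh}
--     return merged, len(fresh), len(new_entries) - len(fresh)
-- ===== Notes on version B (the rewrite author's own statement) =====
-- stated objective: alternative
-- what changed: Instead of A's single pass over new_entries with a membership test and two mutating counters, B inverts the traversal: it copies new_entries and iterates over existing_cache deleting each colliding key from the copy, then does one bulk {**existing, **fresh} merge and derives both counts arithmetically from len(fresh).
import Mathlib
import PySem

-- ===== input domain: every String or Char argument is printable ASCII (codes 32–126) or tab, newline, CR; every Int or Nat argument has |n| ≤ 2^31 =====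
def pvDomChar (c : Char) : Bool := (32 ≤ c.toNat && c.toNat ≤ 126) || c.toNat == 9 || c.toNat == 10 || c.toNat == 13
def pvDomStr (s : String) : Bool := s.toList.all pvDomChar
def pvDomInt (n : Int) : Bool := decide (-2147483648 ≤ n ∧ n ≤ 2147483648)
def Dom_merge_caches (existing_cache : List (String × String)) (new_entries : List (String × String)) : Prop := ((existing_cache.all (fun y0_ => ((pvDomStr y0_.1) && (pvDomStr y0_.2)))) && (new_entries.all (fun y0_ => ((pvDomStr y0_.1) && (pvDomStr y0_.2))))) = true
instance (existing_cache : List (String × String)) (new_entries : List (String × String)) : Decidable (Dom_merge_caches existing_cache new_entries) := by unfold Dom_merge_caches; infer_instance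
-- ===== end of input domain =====

-- B inverts A's traversal: it deletes existing keys from a copy of new_entries, bulk-merges,
-- and derives both counts from the size of that copy (objective: alternative).


-- ===== PORT A =====
-- merged = existing_cache.copy(); for jobname, status in new_entries.items():
--   if jobname in merged: already_exists += 1 else: merged[jobname] = status; added += 1
-- (adding an absent key appends; exact here since merged's keys stay distinct under Pre_)
def merge_caches (existing_cache : List (String × String)) (new_entries : List (String × String)) : (List (String × String)) × Int × Int :=
  new_entries.foldl
    (fun st kv =>
      if (st.1.map Prod.fst).contains kv.1 then
        (st.1, st.2.1, st.2.2 + 1)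
      else
        (st.1 ++ [kv], st.2.1 + 1, st.2.2))
    (existing_cache, 0, 0)

-- ===== PORT B =====
-- fresh = dict(new_entries); for jobname in existing_cache: fresh.pop(jobname, None)
-- merged = {**existing_cache, **fresh}  (ported as: fold Dict.insert of fresh's items into the
-- existing dict); returns (merged, len(fresh), len(new_entries) - len(fresh)).
-- dict(new_entries) is Dict.mk new_entries — exact under Pre_ (no duplicate keys to overwrite).
def merge_caches_alt (existing_cache : List (String × String)) (new_entries : List (String × String)) : (List (String × String)) × Int × Int :=
  let fresh := existing_cache.foldl (fun d kv => d.erase kv.1) (PySem.Dict.mk new_entries)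
  let merged := fresh.items.foldl (fun d kv => d.insert kv.1 kv.2) (PySem.Dict.mk existing_cache)
  (merged.items, (fresh.size : Int), (new_entries.length : Int) - fresh.size)

-- ===== PRECONDITION & SPEC =====
-- Both arguments are Python dicts, whose item lists never carry a duplicate key; Pre_ states
-- exactly that shape (it excludes no input the Python function can actually receive).
def Pre_merge_caches (existing_cache : List (String × String)) (new_entries : List (String × String)) : Prop :=
  (existing_cache.map Prod.fst).Nodup ∧ (new_entries.map Prod.fst).Nodup
instance (existing_cache : List (String × String)) (new_entries : List (String × String)) : Decidable (Pre_merge_caches existing_cache new_entries) := by unfold Pre_merge_caches; infer_instance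
def pvWitness_merge_caches : (List (String × String)) × (List (String × String)) :=
  ([("job1", "done"), ("job2", "failed")], [("job2", "done"), ("job3", "done")])
def Spec_merge_caches (existing_cache : List (String × String)) (new_entries : List (String × String)) (out : (List (String × String)) × Int × Int) : Prop := out = merge_caches_alt existing_cache new_entries
instance (existing_cache : List (String × String)) (new_entries : List (String × String)) (out : (List (String × String)) × Int × Int) : Decidable (Spec_merge_caches existing_cache new_entries out) := by unfold Spec_merge_caches; infer_instance

-- ===== CLAIM (what is proved, stated in full; the proofs are below) =====
def Claim_equal_merge_caches : Prop := ∀ (existing_cache : List (String × String)) (new_entries : List (String × String)), Dom_merge_caches existing_cache new_entries → Pre_merge_caches existing_cache new_entries → Spec_merge_caches existing_cache new_entries (merge_caches existing_cache new_entries)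

-- ===== LEMMAS AND PROOFS =====

-- A's loop, run from any state, appends the new-only entries and adds the two counts.
lemma merge_caches_foldl (new_entries : List (String × String))
    (hnd : (new_entries.map Prod.fst).Nodup) :
    ∀ (ex : List (String × String)) (a b : Int),
    new_entries.foldl
      (fun st kv =>
        if (st.1.map Prod.fst).contains kv.1 then
          (st.1, st.2.1, st.2.2 + 1)
        else
          (st.1 ++ [kv], st.2.1 + 1, st.2.2))
      (ex, a, b)
    = (ex ++ new_entries.filter (fun kv => !((ex.map Prod.fst).contains kv.1)),
       a + (new_entries.filter (fun kv => !((ex.map Prod.fst).contains kv.1))).length,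
       b + ((new_entries.length : Int) -
            (new_entries.filter (fun kv => !((ex.map Prod.fst).contains kv.1))).length)) := by
  induction new_entries with
  | nil => intro ex a b; simp
  | cons kv rest ih =>
    intro ex a b
    simp only [List.map_cons, List.nodup_cons, List.mem_map] at hnd
    obtain ⟨hkv, hrest⟩ := hnd
    simp only [List.foldl_cons]
    by_cases hc : (ex.map Prod.fst).contains kv.1 = true
    · rw [if_pos hc, ih hrest ex a (b + 1)]
      have hfc : List.filter (fun p => !(ex.map Prod.fst).contains p.1) (kv :: rest)
          = List.filter (fun p => !(ex.map Prod.fst).contains p.1) rest := by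
        simp only [List.filter_cons]
        rw [if_neg (show ¬((!(List.map Prod.fst ex).contains kv.1) = true) from
          fun h => by rw [hc] at h; simp at h)]
      rw [hfc]
      refine congrArg (Prod.mk _) (Prod.ext rfl ?_)
      simp only [List.length_cons]
      push_cast
      ring
    · have hc' : (ex.map Prod.fst).contains kv.1 = false := by simpa using hc
      rw [if_neg hc, ih hrest (ex ++ [kv]) (a + 1) b]
      have hfeq : rest.filter (fun p => !(((ex ++ [kv]).map Prod.fst).contains p.1))
          = rest.filter (fun p => !((ex.map Prod.fst).contains p.1)) := by
        apply List.filter_congr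
        intro p hp
        have hne : p.1 ≠ kv.1 := fun h => hkv ⟨p, hp, h⟩
        simp [hne]
      have hfc : List.filter (fun p => !(ex.map Prod.fst).contains p.1) (kv :: rest)
          = kv :: List.filter (fun p => !(ex.map Prod.fst).contains p.1) rest := by
        simp only [List.filter_cons]
        rw [if_pos]
        simp
        intro x hx
        exact (show kv.1 ∉ List.map Prod.fst ex by simpa using hc')
          (List.mem_map.mpr ⟨(kv.1, x), hx, rfl⟩)
      rw [hfeq, hfc]
      refine Prod.ext ?_ (Prod.ext ?_ ?_)
      · simp
      · simp only [List.length_cons]; push_cast; ring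
      · simp only [List.length_cons]; push_cast; ring

-- B's deletion loop: folding erase of every existing key over a dict leaves exactly the
-- entries whose key is not an existing key.
lemma erase_foldl_items (ex : List (String × String)) :
    ∀ (l : List (String × String)),
    (ex.foldl (fun d kv => d.erase kv.1) (PySem.Dict.mk l)).items
      = l.filter (fun kv => !((ex.map Prod.fst).contains kv.1)) := by
  induction ex with
  | nil => intro l; simp
  | cons e ex ih =>
    intro l
    simp only [List.foldl_cons]
    rw [show (PySem.Dict.mk l).erase e.1
        = PySem.Dict.mk (l.filter (fun p => !(p.1 == e.1))) from rfl, ih]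
    rw [List.filter_filter]
    apply List.filter_congr
    intro p _
    simp only [List.map_cons, List.contains_cons]
    by_cases h : p.1 = e.1 <;> simp [h, Bool.and_comm]

-- ===== VERDICT (by name: the statement is the Claim_ definition above) =====
theorem merge_caches_spec : Claim_equal_merge_caches := by
  intro ex new _ hpre
  unfold Spec_merge_caches merge_caches merge_caches_alt
  rw [merge_caches_foldl new hpre.2 ex 0 0]
  simp only [erase_foldl_items ex new]
  set F := new.filter (fun kv => !((ex.map Prod.fst).contains kv.1)) with hF
  have hmerged : (F.foldl (fun d kv => d.insert kv.1 kv.2) (PySem.Dict.mk ex)).items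
      = ex ++ F.map (fun p => (p.1, p.2)) := by
    apply PySem.Dict.items_foldl_insert_fresh F Prod.fst Prod.snd (PySem.Dict.mk ex)
    · intro p hp
      have := List.of_mem_filter hp
      simp only [Bool.not_eq_true'] at this
      show (List.any ex fun q => q.1 == p.1) = false
      rw [List.any_eq_false]
      intro q hq hqp
      have : (ex.map Prod.fst).contains p.1 = true := by
        simpa [List.contains_eq_mem] using List.mem_map.mpr ⟨q, hq, eq_of_beq hqp⟩
      simp_all
    · exact List.Nodup.sublist (List.Sublist.map Prod.fst List.filter_sublist) hpre.2
  rw [hmerged]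
  have hsz : (ex.foldl (fun d kv => d.erase kv.1) (PySem.Dict.mk new)).size = F.length := by
    simp [PySem.Dict.size, erase_foldl_items ex new, hF]
  rw [hsz]
  simp
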